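-- pv_equiv track=rewrite | github.com/ramiluisto/SudokuSpeedTests | src/sudoku_solver.py | get_sudoku_blo
-- ===== SOURCE A (Python) =====
-- def get_sudoku_blo(idx, sudoku):
--
--     blo_row = idx//27
--     blo_col = (idx//3)%3
--     top_left = 27*blo_row + 3*blo_col
--
--     shifts = [*range(3), *range(9, 12), *range(18, 21)]
--     block = []
--     for shift in shifts:
--         internal_idx = top_left + shift
--         row = internal_idx//9
--         col = internal_idx%9
--         block.append(sudoku[row][col])
--
--     return block
-- ===== SOURCE B (Python) =====
-- def get_sudoku_blo(idx, sudoku):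
--     r0 = 3 * (idx // 27)
--     c0 = 3 * ((idx // 3) % 3)
--     rows = [sudoku[r0], sudoku[r0 + 1], sudoku[r0 + 2]]
--     cols = [[row[c] for row in rows] for c in (c0, c0 + 1, c0 + 2)]
--     return [col[r] for r in range(3) for col in cols]
-- ===== Notes on version B (the rewrite author's own statement) =====
-- stated objective: alternative
-- what changed: Fetches the three row objects of the block once, gathers the nine cells column-by-column, and transposes back to row-major, instead of A's flat shift table with a divmod-by-9 reconstruction of each cell's coordinates.
import Mathlib
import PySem

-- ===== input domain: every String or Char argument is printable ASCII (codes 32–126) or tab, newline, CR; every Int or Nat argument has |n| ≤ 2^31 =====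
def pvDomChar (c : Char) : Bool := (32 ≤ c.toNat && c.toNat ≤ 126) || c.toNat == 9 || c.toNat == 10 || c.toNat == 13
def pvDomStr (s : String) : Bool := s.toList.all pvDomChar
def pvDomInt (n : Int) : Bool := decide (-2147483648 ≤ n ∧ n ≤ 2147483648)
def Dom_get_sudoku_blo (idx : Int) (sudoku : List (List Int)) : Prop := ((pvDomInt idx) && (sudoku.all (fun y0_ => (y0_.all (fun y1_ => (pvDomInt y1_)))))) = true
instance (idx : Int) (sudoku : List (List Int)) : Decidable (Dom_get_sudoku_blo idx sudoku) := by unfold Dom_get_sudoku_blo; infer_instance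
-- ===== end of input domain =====

-- B fetches the block's three row objects once, gathers the cells column-by-column and
-- transposes back, instead of A's flat shift table with per-cell divmod reconstruction
-- (objective: alternative decomposition, same cost).

-- ===== PORT A =====
def get_sudoku_blo (idx : Int) (sudoku : List (List Int)) : List Int :=
  let blo_row := PySem.Int.floordiv idx 27
  let blo_col := PySem.Int.mod (PySem.Int.floordiv idx 3) 3
  let top_left := 27 * blo_row + 3 * blo_col
  let shifts := PySem.List.pyRange 0 3 1 ++ PySem.List.pyRange 9 12 1 ++ PySem.List.pyRange 18 21 1
  shifts.foldl (fun block shift =>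
    let internal_idx := top_left + shift
    let row := PySem.Int.floordiv internal_idx 9
    let col := PySem.Int.mod internal_idx 9
    block ++ [PySem.List.pyGetD (PySem.List.pyGetD sudoku row []) col 0]) []

-- ===== PORT B =====
def get_sudoku_blo_alt (idx : Int) (sudoku : List (List Int)) : List Int :=
  let r0 := 3 * PySem.Int.floordiv idx 27
  let c0 := 3 * PySem.Int.mod (PySem.Int.floordiv idx 3) 3
  let rows := [PySem.List.pyGetD sudoku r0 [], PySem.List.pyGetD sudoku (r0 + 1) [],
               PySem.List.pyGetD sudoku (r0 + 2) []]
  let cols := [c0, c0 + 1, c0 + 2].map (fun c => rows.map (fun row => PySem.List.pyGetD row c 0))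
  (PySem.List.pyRange 0 3 1).flatMap (fun r => cols.map (fun col => PySem.List.pyGetD col r 0))

-- ===== PRECONDITION & SPEC =====
-- Pre_ excludes exactly the inputs on which the Python A raises IndexError: one of the
-- nine block cells is out of range (Python negative-index wraparound counts as in range).
def Pre_get_sudoku_blo (idx : Int) (sudoku : List (List Int)) : Prop :=
  ∀ r ∈ PySem.List.pyRange 0 3 1, ∀ c ∈ PySem.List.pyRange 0 3 1,
    PySem.Raise.InRange sudoku.length (3 * PySem.Int.floordiv idx 27 + r) ∧
    PySem.Raise.InRange (PySem.List.pyGetD sudoku (3 * PySem.Int.floordiv idx 27 + r) []).length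
      (3 * PySem.Int.mod (PySem.Int.floordiv idx 3) 3 + c)
instance (idx : Int) (sudoku : List (List Int)) : Decidable (Pre_get_sudoku_blo idx sudoku) := by
  unfold Pre_get_sudoku_blo; infer_instance

def pvWitness_get_sudoku_blo : Int × List (List Int) :=
  (0, [[1,2,3,4,5,6,7,8,9],[1,2,3,4,5,6,7,8,9],[1,2,3,4,5,6,7,8,9],
       [1,2,3,4,5,6,7,8,9],[1,2,3,4,5,6,7,8,9],[1,2,3,4,5,6,7,8,9],
       [1,2,3,4,5,6,7,8,9],[1,2,3,4,5,6,7,8,9],[1,2,3,4,5,6,7,8,9]])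

def Spec_get_sudoku_blo (idx : Int) (sudoku : List (List Int)) (out : List Int) : Prop := out = get_sudoku_blo_alt idx sudoku
instance (idx : Int) (sudoku : List (List Int)) (out : List Int) : Decidable (Spec_get_sudoku_blo idx sudoku out) := by unfold Spec_get_sudoku_blo; infer_instance

-- ===== CLAIM (what is proved, stated in full; the proofs are below) =====
def Claim_equal_get_sudoku_blo : Prop := ∀ (idx : Int) (sudoku : List (List Int)), Dom_get_sudoku_blo idx sudoku → Pre_get_sudoku_blo idx sudoku → Spec_get_sudoku_blo idx sudoku (get_sudoku_blo idx sudoku)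

-- ===== LEMMAS AND PROOFS =====

-- A's divmod-by-9 reconstruction recovers the 2D block coordinates.
theorem blk_coords (br bc r c : Int) (hbc0 : 0 ≤ bc) (hbc : bc < 3)
    (_hr0 : 0 ≤ r) (_hr : r < 3) (hc0 : 0 ≤ c) (hc : c < 3) :
    PySem.Int.floordiv (27 * br + 3 * bc + (9 * r + c)) 9 = 3 * br + r ∧
    PySem.Int.mod (27 * br + 3 * bc + (9 * r + c)) 9 = 3 * bc + c := by
  have h1 : PySem.Int.floordiv (27 * br + 3 * bc + (9 * r + c)) 9 = 3 * br + r := by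
    rw [PySem.Int.floordiv_eq_iff_of_pos (by norm_num)]
    constructor <;> nlinarith
  refine ⟨h1, ?_⟩
  have h2 := PySem.Int.floordiv_mul_add_mod (27 * br + 3 * bc + (9 * r + c)) 9
  rw [h1] at h2; linarith

-- literal three-element list indexing (Python col[0], col[1], col[2])
theorem pyGetD_lit0 {α : Type} (x y z d : α) : PySem.List.pyGetD [x, y, z] 0 d = x := by
  simp [PySem.List.pyGetD, PySem.List.pyIdx?, PySem.List.pyGet?]
theorem pyGetD_lit1 {α : Type} (x y z d : α) : PySem.List.pyGetD [x, y, z] 1 d = y := by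
  simp [PySem.List.pyGetD, PySem.List.pyIdx?, PySem.List.pyGet?]
theorem pyGetD_lit2 {α : Type} (x y z d : α) : PySem.List.pyGetD [x, y, z] 2 d = z := by
  simp [PySem.List.pyGetD, PySem.List.pyIdx?, PySem.List.pyGet?]

theorem get_sudoku_blo_eq_alt (idx : Int) (sudoku : List (List Int)) :
    get_sudoku_blo idx sudoku = get_sudoku_blo_alt idx sudoku := by
  have hbc0 : 0 ≤ PySem.Int.mod (PySem.Int.floordiv idx 3) 3 :=
    PySem.Int.mod_nonneg _ (by norm_num)
  have hbc : PySem.Int.mod (PySem.Int.floordiv idx 3) 3 < 3 :=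
    PySem.Int.mod_lt _ (by norm_num)
  set br := PySem.Int.floordiv idx 27 with hbrdef
  set bc := PySem.Int.mod (PySem.Int.floordiv idx 3) 3 with hbcdef
  have key : ∀ (r c : Int), 0 ≤ r → r < 3 → 0 ≤ c → c < 3 →
      PySem.List.pyGetD
        (PySem.List.pyGetD sudoku (PySem.Int.floordiv (27 * br + 3 * bc + (9 * r + c)) 9) [])
        (PySem.Int.mod (27 * br + 3 * bc + (9 * r + c)) 9) 0
      = PySem.List.pyGetD (PySem.List.pyGetD sudoku (3 * br + r) []) (3 * bc + c) 0 := by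
    intro r c h0 h1 h2 h3
    obtain ⟨e1, e2⟩ := blk_coords br bc r c hbc0 hbc h0 h1 h2 h3
    rw [e1, e2]
  have hsh : PySem.List.pyRange 0 3 1 ++ PySem.List.pyRange 9 12 1 ++ PySem.List.pyRange 18 21 1
      = [0, 1, 2, 9, 10, 11, 18, 19, 20] := by decide
  have hr3 : PySem.List.pyRange 0 3 1 = [0, 1, 2] := by decide
  simp only [get_sudoku_blo, get_sudoku_blo_alt, ← hbrdef, ← hbcdef]
  rw [hsh, hr3]
  simp only [List.foldl, List.nil_append, List.cons_append, List.map, List.flatMap,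
    List.flatten, pyGetD_lit0, pyGetD_lit1, pyGetD_lit2, List.append_eq, List.append_nil,
    List.cons.injEq]
  refine ⟨?_, ?_, ?_, ?_, ?_, ?_, ?_, ?_, ?_, trivial⟩
  · simpa using key 0 0 (by norm_num) (by norm_num) (by norm_num) (by norm_num)
  · simpa using key 0 1 (by norm_num) (by norm_num) (by norm_num) (by norm_num)
  · simpa using key 0 2 (by norm_num) (by norm_num) (by norm_num) (by norm_num)
  · simpa using key 1 0 (by norm_num) (by norm_num) (by norm_num) (by norm_num)
  · simpa using key 1 1 (by norm_num) (by norm_num) (by norm_num) (by norm_num)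
  · simpa using key 1 2 (by norm_num) (by norm_num) (by norm_num) (by norm_num)
  · simpa using key 2 0 (by norm_num) (by norm_num) (by norm_num) (by norm_num)
  · simpa using key 2 1 (by norm_num) (by norm_num) (by norm_num) (by norm_num)
  · simpa using key 2 2 (by norm_num) (by norm_num) (by norm_num) (by norm_num)

-- ===== VERDICT (by name: the statement is the Claim_ definition above) =====
theorem get_sudoku_blo_spec : Claim_equal_get_sudoku_blo := by
  intro idx sudoku _ _
  unfold Spec_get_sudoku_blo
  exact get_sudoku_blo_eq_alt idx sudoku
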